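-- pv_equiv track=rewrite | github.com/ConsortiumGARR/pyangdantic | utils/pyang_plugins/pyangdantic.py | _convert_yang_regex
-- ===== SOURCE A (Python) =====
-- def _convert_yang_regex(pattern: str) -> str:
--     """
--     Convert YANG (XSD) regex to Python re syntax.
--     Handles common incompatibilities like \\p{N}.
--     """
--     translation_map = {
--         # https://www.w3.org/TR/2004/REC-xmlschema-2-20041028/#nt-charProp
--         # copied from pydantify, credits to them!
--         r"\p{L}": r"\w",  # All Letters
--         r"\P{L}": r"\W",  # All Letters
--         r"\p{Lu}": r"[A-Z]",  # uppercase
--         r"\P{Lu}": r"[^A-Z]",  # uppercase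
--         r"\p{Ll}": r"[a-z]",  # uppercase
--         r"\P{Ll}": r"[^a-z]",  # uppercase
--         r"\p{N}": r"\d",  # All Numbers
--         r"\P{N}": r"\D",  # All Numbers
--         r"\p{Nd}": r"\d",  # decimal digit
--         r"\P{Nd}": r"\D",  # decimal digit
--         r"\p{C}": r"[\x00-\x1F\x7F-\x9F]",  # invisible control characters and unused code points
--         r"\P{C}": r"[^\x00-\x1F\x7F-\x9F]",  # invisible control characters and unused code points
--         r"\p{P}": r"[!\"'#$%&\"()*+,\-./:;<=>?@[\\\]^_`{|}~]",  # punctuation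
--         r"\P{P}": r"[^!\"'#$%&\"()*+,\-./:;<=>?@[\\\]^_`{|}~]",  # punctuation
--     }
--
--     for search, replace in translation_map.items():
--         pattern = pattern.replace(search, replace)
--
--     return pattern
-- ===== SOURCE B (Python) =====
-- def _convert_yang_regex(pattern: str) -> str:
--     """
--     Convert YANG (XSD) regex to Python re syntax in a single left-to-right
--     scan: at each position the first matching charclass token is replaced,
--     instead of running one full-string .replace() pass per token.
--     """
--     translation_map = {
--         r"\p{L}": r"\w",
--         r"\P{L}": r"\W",
--         r"\p{Lu}": r"[A-Z]",
--         r"\P{Lu}": r"[^A-Z]",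
--         r"\p{Ll}": r"[a-z]",
--         r"\P{Ll}": r"[^a-z]",
--         r"\p{N}": r"\d",
--         r"\P{N}": r"\D",
--         r"\p{Nd}": r"\d",
--         r"\P{Nd}": r"\D",
--         r"\p{C}": r"[\x00-\x1F\x7F-\x9F]",
--         r"\P{C}": r"[^\x00-\x1F\x7F-\x9F]",
--         r"\p{P}": r"[!\"'#$%&\"()*+,\-./:;<=>?@[\\\]^_`{|}~]",
--         r"\P{P}": r"[^!\"'#$%&\"()*+,\-./:;<=>?@[\\\]^_`{|}~]",
--     }
--     out = []
--     i = 0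
--     n = len(pattern)
--     while i < n:
--         for search, replace in translation_map.items():
--             if pattern.startswith(search, i):
--                 out.append(replace)
--                 i += len(search)
--                 break
--         else:
--             out.append(pattern[i])
--             i += 1
--     return "".join(out)
-- ===== Notes on version B (the rewrite author's own statement) =====
-- stated objective: alternative
-- what changed: Replaces A's 14 sequential full-string str.replace passes (one per charclass token) by a single left-to-right scan that, at each position, emits the first matching token's translation or copies the character.
import Mathlib
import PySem

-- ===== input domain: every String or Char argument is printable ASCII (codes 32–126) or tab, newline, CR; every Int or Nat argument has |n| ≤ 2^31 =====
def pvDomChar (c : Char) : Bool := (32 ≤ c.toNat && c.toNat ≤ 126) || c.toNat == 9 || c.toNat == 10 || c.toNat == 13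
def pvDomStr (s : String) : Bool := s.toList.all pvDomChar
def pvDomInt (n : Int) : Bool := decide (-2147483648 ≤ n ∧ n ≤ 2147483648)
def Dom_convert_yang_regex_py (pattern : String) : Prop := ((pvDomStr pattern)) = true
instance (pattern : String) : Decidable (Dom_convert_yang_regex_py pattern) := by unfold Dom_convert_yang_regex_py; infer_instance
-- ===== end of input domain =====

-- B replaces A's 14 sequential full-string str.replace passes by a single left-to-right
-- scan emitting, at each position, the first matching token's translation (objective: alternative).

-- ===== PORT A =====
-- A's translation_map: a dict literal iterated in insertion order (distinct keys).
def pvTransMapA : List (String × String) :=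
  [("\\p{L}", "\\w"),
   ("\\P{L}", "\\W"),
   ("\\p{Lu}", "[A-Z]"),
   ("\\P{Lu}", "[^A-Z]"),
   ("\\p{Ll}", "[a-z]"),
   ("\\P{Ll}", "[^a-z]"),
   ("\\p{N}", "\\d"),
   ("\\P{N}", "\\D"),
   ("\\p{Nd}", "\\d"),
   ("\\P{Nd}", "\\D"),
   ("\\p{C}", "[\\x00-\\x1F\\x7F-\\x9F]"),
   ("\\P{C}", "[^\\x00-\\x1F\\x7F-\\x9F]"),
   ("\\p{P}", "[!\\\"'#$%&\\\"()*+,\\-./:;<=>?@[\\\\\\]^_`{|}~]"),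
   ("\\P{P}", "[^!\\\"'#$%&\\\"()*+,\\-./:;<=>?@[\\\\\\]^_`{|}~]")]

-- for search, replace in translation_map.items(): pattern = pattern.replace(search, replace)
def convert_yang_regex_py (pattern : String) : String :=
  pvTransMapA.foldl (fun p sr => PySem.Str.replace p sr.1 sr.2) pattern

-- ===== PORT B =====
-- the same dict, scanned tokenwise (keys and values as char lists)
def pvTableB : List (List Char × List Char) :=
  [(("\\p{L}" : String).toList, ("\\w" : String).toList),
   (("\\P{L}" : String).toList, ("\\W" : String).toList),
   (("\\p{Lu}" : String).toList, ("[A-Z]" : String).toList),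
   (("\\P{Lu}" : String).toList, ("[^A-Z]" : String).toList),
   (("\\p{Ll}" : String).toList, ("[a-z]" : String).toList),
   (("\\P{Ll}" : String).toList, ("[^a-z]" : String).toList),
   (("\\p{N}" : String).toList, ("\\d" : String).toList),
   (("\\P{N}" : String).toList, ("\\D" : String).toList),
   (("\\p{Nd}" : String).toList, ("\\d" : String).toList),
   (("\\P{Nd}" : String).toList, ("\\D" : String).toList),
   (("\\p{C}" : String).toList, ("[\\x00-\\x1F\\x7F-\\x9F]" : String).toList),
   (("\\P{C}" : String).toList, ("[^\\x00-\\x1F\\x7F-\\x9F]" : String).toList),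
   (("\\p{P}" : String).toList, ("[!\\\"'#$%&\\\"()*+,\\-./:;<=>?@[\\\\\\]^_`{|}~]" : String).toList),
   (("\\P{P}" : String).toList, ("[^!\\\"'#$%&\\\"()*+,\\-./:;<=>?@[\\\\\\]^_`{|}~]" : String).toList)]

-- for search, replace in translation_map.items(): if pattern.startswith(search, i): …
def pvFirstTok (l : List Char) : Option (List Char × List Char) :=
  pvTableB.find? (fun p => p.1.isPrefixOf l)

-- termination fact for the scan below (cited in its decreasing_by)
theorem pvFirstTok_spec {l : List Char} {p : List Char × List Char}
    (h : pvFirstTok l = some p) : 0 < p.1.length ∧ p.1.length ≤ l.length := by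
  have hm := List.mem_of_find?_eq_some h
  have hp := List.find?_some h
  have hle := (List.isPrefixOf_iff_prefix.mp hp).length_le
  have hpos : ∀ q ∈ pvTableB, 0 < q.1.length := by decide
  exact ⟨hpos p hm, hle⟩

-- the while loop over i / out: recursion on the remaining suffix, emitting pieces
def pvScanB (l : List Char) : List Char :=
  match h : pvFirstTok l with
  | some p => p.2 ++ pvScanB (l.drop p.1.length)
  | none =>
    match l with
    | [] => []
    | c :: cs => c :: pvScanB cs
termination_by l.length
decreasing_by
  · have h1 := pvFirstTok_spec h
    simp only [List.length_drop]
    omega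
  · simp

-- return "".join(out)
def convert_yang_regex_py_alt (pattern : String) : String :=
  String.ofList (pvScanB pattern.toList)

-- ===== PRECONDITION & SPEC =====
def Spec_convert_yang_regex_py (pattern : String) (out : String) : Prop := out = convert_yang_regex_py_alt pattern
instance (pattern : String) (out : String) : Decidable (Spec_convert_yang_regex_py pattern out) := by unfold Spec_convert_yang_regex_py; infer_instance

-- ===== CLAIM (what is proved, stated in full; the proofs are below) =====
def Claim_equal_convert_yang_regex_py : Prop := ∀ (pattern : String), Dom_convert_yang_regex_py pattern → Spec_convert_yang_regex_py pattern (convert_yang_regex_py pattern)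

-- ===== LEMMAS AND PROOFS =====

-- unfolding equations of the scan
theorem pvScanB_some {l : List Char} {p : List Char × List Char} (h : pvFirstTok l = some p) :
    pvScanB l = p.2 ++ pvScanB (l.drop p.1.length) := by
  rw [pvScanB.eq_def]
  split
  · next p' h' =>
    rw [h] at h'; cases h'; rfl
  · next h' => rw [h] at h'; cases h'

theorem pvScanB_cons_none {c : Char} {cs : List Char} (h : pvFirstTok (c :: cs) = none) :
    pvScanB (c :: cs) = c :: pvScanB cs := by
  rw [pvScanB.eq_def]
  split
  · next p' h' => rw [h] at h'; cases h'
  · rfl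

theorem pvScanB_nil : pvScanB [] = [] := by
  rw [pvScanB.eq_def]
  split
  · next p' h' =>
    have hnone : pvFirstTok [] = none := by decide
    rw [hnone] at h'; cases h'
  · rfl

-- Python str.replace (nonempty needle) as a plain spine recursion, for the proofs
def pvRep (old new : List Char) : List Char → List Char
  | [] => []
  | c :: t =>
    if h : old ≠ [] ∧ old.isPrefixOf (c :: t) then
      new ++ pvRep old new ((c :: t).drop old.length)
    else
      c :: pvRep old new t
termination_by l => l.length
decreasing_by
  · simp only [List.length_drop, List.length_cons]
    have : 0 < old.length := List.length_pos_iff.mpr h.1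
    omega
  · simp

theorem pvRep_nil (old new : List Char) : pvRep old new [] = [] := by
  rw [pvRep.eq_def]

theorem pvRep_cons_pos {old : List Char} (new : List Char) {c : Char} {t : List Char}
    (h : old ≠ []) (hp : old.isPrefixOf (c :: t) = true) :
    pvRep old new (c :: t) = new ++ pvRep old new ((c :: t).drop old.length) := by
  rw [pvRep.eq_def]
  simp only [dif_pos (And.intro h hp)]

theorem pvRep_cons_neg {old : List Char} (new : List Char) {c : Char} {t : List Char}
    (hp : old.isPrefixOf (c :: t) = false) :
    pvRep old new (c :: t) = c :: pvRep old new t := by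
  rw [pvRep.eq_def]
  simp only [dif_neg (show ¬(old ≠ [] ∧ old.isPrefixOf (c :: t) = true) by simp [hp])]

theorem pvRep_append {old new x : List Char} (h : old ≠ []) :
    pvRep old new (old ++ x) = new ++ pvRep old new x := by
  match old, h with
  | c :: t, h2 =>
    rw [show (c :: t) ++ x = c :: (t ++ x) from rfl]
    rw [pvRep_cons_pos new h2 (List.isPrefixOf_iff_prefix.mpr
      (show (c :: t) <+: c :: (t ++ x) from List.prefix_append _ _))]
    congr 1
    rw [show c :: (t ++ x) = (c :: t) ++ x from rfl, List.drop_left]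

-- PySem.Chars.replace agrees with pvRep for a nonempty needle
theorem pvGo_eq (old new : List Char) (hold : old ≠ []) :
    ∀ (fuel : Nat) (l acc : List Char), l.length ≤ fuel →
      PySem.Chars.replace.go old new fuel l acc = acc.reverse ++ pvRep old new l := by
  intro fuel
  induction fuel with
  | zero =>
    intro l acc hl
    have hnil : l = [] := List.eq_nil_of_length_eq_zero (Nat.le_zero.mp hl)
    subst hnil
    simp [PySem.Chars.replace.go, pvRep_nil]
  | succ n ih =>
    intro l acc hl
    match l with
    | [] => simp [PySem.Chars.replace.go, pvRep_nil]
    | c :: t =>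
      have hlen : 0 < old.length := List.length_pos_iff.mpr hold
      simp only [PySem.Chars.replace.go]
      by_cases hp : old.isPrefixOf (c :: t) = true
      · rw [if_pos hp]
        rw [ih ((c :: t).drop old.length) (new.reverse ++ acc)
            (by simp only [List.length_drop, List.length_cons]; simp only [List.length_cons] at hl; omega)]
        rw [pvRep_cons_pos new hold hp]
        simp [List.append_assoc]
      · have hp' : old.isPrefixOf (c :: t) = false := by simp only [Bool.not_eq_true] at hp; exact hp
        rw [if_neg (by simp [hp'])]
        rw [ih t (c :: acc) (by simp only [List.length_cons] at hl; omega)]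
        rw [pvRep_cons_neg new hp']
        simp

theorem pvReplace_eq {old : List Char} (l new : List Char) (hold : old ≠ []) :
    PySem.Chars.replace l old new = pvRep old new l := by
  unfold PySem.Chars.replace
  rw [if_neg (by simpa using hold)]
  rw [pvGo_eq old new hold l.length l [] le_rfl]
  simp

-- a token never lies inside or across a replacement: token-tail fragments (no '\' or '[')
-- found as a prefix of a replaced string were already a prefix of the original
theorem pvFrag (t u : List Char) (ht : t ≠ [])
    (hu : ∃ u0 us, u = u0 :: us ∧ (u0 = '\\' ∨ u0 = '[')) :
    ∀ (w cs : List Char), w ≠ [] → (∀ c ∈ w, c ≠ '\\' ∧ c ≠ '[') →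
      w.isPrefixOf (pvRep t u cs) = true → w.isPrefixOf cs = true := by
  suffices H : ∀ (n : Nat) (w cs : List Char), cs.length ≤ n → w ≠ [] →
      (∀ c ∈ w, c ≠ '\\' ∧ c ≠ '[') →
      w.isPrefixOf (pvRep t u cs) = true → w.isPrefixOf cs = true by
    intro w cs hw hwc hpre
    exact H cs.length w cs le_rfl hw hwc hpre
  intro n
  induction n with
  | zero =>
    intro w cs hl hw hwc hpre
    have hnil : cs = [] := List.eq_nil_of_length_eq_zero (Nat.le_zero.mp hl)
    subst hnil
    rw [pvRep_nil] at hpre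
    match w with
    | [] => exact absurd rfl hw
    | w0 :: ws => simp [List.isPrefixOf] at hpre
  | succ n ih =>
    intro w cs hl hw hwc hpre
    match cs with
    | [] =>
      rw [pvRep_nil] at hpre
      match w with
      | [] => exact absurd rfl hw
      | w0 :: ws => simp [List.isPrefixOf] at hpre
    | c :: cs' =>
      by_cases hm : t.isPrefixOf (c :: cs') = true
      · rw [pvRep_cons_pos u ht hm] at hpre
        obtain ⟨u0, us, rfl, hu0⟩ := hu
        match w with
        | [] => exact absurd rfl hw
        | w0 :: ws =>
          simp only [List.cons_append, List.isPrefixOf, Bool.and_eq_true, beq_iff_eq] at hpre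
          have := hwc w0 (List.mem_cons_self)
          rcases hu0 with rfl | rfl
          · exact absurd hpre.1 this.1
          · exact absurd hpre.1 this.2
      · have hm' : t.isPrefixOf (c :: cs') = false := by simp only [Bool.not_eq_true] at hm; exact hm
        rw [pvRep_cons_neg u hm'] at hpre
        match w with
        | [] => exact absurd rfl hw
        | w0 :: ws =>
          simp only [List.isPrefixOf, Bool.and_eq_true, beq_iff_eq] at hpre ⊢
          refine ⟨hpre.1, ?_⟩
          by_cases hws : ws = []
          · subst hws; simp [List.isPrefixOf]
          · exact ih ws cs' (by simp only [List.length_cons] at hl; omega) hws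
              (fun c hc => hwc c (List.mem_cons_of_mem _ hc)) hpre.2

-- a replacement pass never creates a new occurrence of a token at the front
theorem pvNoCreate (t u : List Char) (ht : t ≠ [])
    (hu : ∃ u0 u1 us, u = u0 :: u1 :: us ∧ (u0 = '[' ∨ (u0 = '\\' ∧ u1 ≠ 'p' ∧ u1 ≠ 'P')))
    (ti : List Char)
    (hti : ∃ c1 tr, ti = '\\' :: c1 :: tr ∧ (c1 = 'p' ∨ c1 = 'P') ∧
      ∀ c ∈ c1 :: tr, c ≠ '\\' ∧ c ≠ '[')
    (cs : List Char) (h : ti.isPrefixOf cs = false) :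
    ti.isPrefixOf (pvRep t u cs) = false := by
  obtain ⟨c1, tr, rfl, hc1, hch⟩ := hti
  match cs with
  | [] => rw [pvRep_nil]; simp [List.isPrefixOf]
  | c :: cs' =>
    by_cases hm : t.isPrefixOf (c :: cs') = true
    · rw [pvRep_cons_pos u ht hm]
      obtain ⟨u0, u1, us, rfl, hu0⟩ := hu
      simp only [List.cons_append, List.isPrefixOf]
      rcases hu0 with rfl | ⟨rfl, hp, hP⟩
      · simp
      · simp only [Bool.and_eq_false_iff]
        rcases hc1 with rfl | rfl
        · refine Or.inr (Or.inl ?_); simp [beq_eq_false_iff_ne]; exact fun he => hp he.symm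
        · refine Or.inr (Or.inl ?_); simp [beq_eq_false_iff_ne]; exact fun he => hP he.symm
    · have hm' : t.isPrefixOf (c :: cs') = false := by simp only [Bool.not_eq_true] at hm; exact hm
      rw [pvRep_cons_neg u hm']
      simp only [List.isPrefixOf] at h ⊢
      simp only [Bool.and_eq_false_iff] at h ⊢
      rcases h with h | h
      · exact Or.inl h
      · by_cases hfr : (c1 :: tr).isPrefixOf (pvRep t u cs') = true
        · have : (c1 :: tr).isPrefixOf cs' = true := by
            refine pvFrag t u ht ?_ (c1 :: tr) cs' (by simp) hch hfr
            obtain ⟨u0, u1, us, rfl, hu0⟩ := hu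
            refine ⟨u0, u1 :: us, rfl, ?_⟩
            rcases hu0 with rfl | ⟨rfl, _⟩
            · exact Or.inr rfl
            · exact Or.inl rfl
          rw [this] at h; cases h
        · exact Or.inr (by simp only [Bool.not_eq_true] at hfr; exact hfr)

-- the fold of all replacement passes
def pvFold (TL : List (List Char × List Char)) (l : List Char) : List Char :=
  TL.foldl (fun s p => pvRep p.1 p.2 s) l

theorem pvFold_nil : ∀ (TL : List (List Char × List Char)), pvFold TL [] = [] := by
  intro TL
  induction TL with
  | nil => rfl
  | cons p TL ih => simpa [pvFold, List.foldl_cons, pvRep_nil] using ih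

-- shape facts about every table entry, used by the interference lemmas
def pvGoodB (p : List Char × List Char) : Bool :=
  match p.1, p.2 with
  | '\\' :: c1 :: tr, u0 :: u1 :: _ =>
      (c1 == 'p' || c1 == 'P') && (c1 :: tr).all (fun c => c != '\\' && c != '[')
      && (u0 == '[' || (u0 == '\\' && u1 != 'p' && u1 != 'P'))
  | _, _ => false

theorem pvGoodB_elim {p : List Char × List Char} (h : pvGoodB p = true) :
    p.1 ≠ [] ∧
    (∃ u0 u1 us, p.2 = u0 :: u1 :: us ∧ (u0 = '[' ∨ (u0 = '\\' ∧ u1 ≠ 'p' ∧ u1 ≠ 'P'))) ∧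
    (∃ c1 tr, p.1 = '\\' :: c1 :: tr ∧ (c1 = 'p' ∨ c1 = 'P') ∧
      ∀ c ∈ c1 :: tr, c ≠ '\\' ∧ c ≠ '[') := by
  unfold pvGoodB at h
  split at h
  · next c1 tr u0 u1 us heq1 heq2 =>
    simp only [Bool.and_eq_true, Bool.or_eq_true, beq_iff_eq, List.all_eq_true,
      bne_iff_ne, ne_eq] at h
    obtain ⟨⟨hc1, hall⟩, hu⟩ := h
    refine ⟨by rw [heq1]; simp, ⟨u0, u1, us, heq2, ?_⟩,
      ⟨c1, tr, heq1, hc1, fun c hc => hall c hc⟩⟩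
    rcases hu with hu | hu
    · exact Or.inl hu
    · exact Or.inr ⟨hu.1.1, hu.1.2, hu.2⟩
  · cases h

theorem pvTable_good : ∀ p ∈ pvTableB, pvGoodB p = true := by decide

-- peel one unmatched character through every pass
theorem pvFoldCons (TL : List (List Char × List Char))
    (hg : ∀ p ∈ TL, pvGoodB p = true) :
    ∀ (c : Char) (cs : List Char), (∀ p ∈ TL, p.1.isPrefixOf (c :: cs) = false) →
      pvFold TL (c :: cs) = c :: pvFold TL cs := by
  induction TL with
  | nil => intro c cs _; rfl
  | cons p TL' ih =>
    intro c cs h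
    have hp := h p List.mem_cons_self
    obtain ⟨ht, hu, _⟩ := pvGoodB_elim (hg p List.mem_cons_self)
    have hstep : pvFold (p :: TL') (c :: cs) = pvFold TL' (c :: pvRep p.1 p.2 cs) := by
      simp [pvFold, List.foldl_cons, pvRep_cons_neg p.2 hp]
    rw [hstep]
    rw [ih (fun q hq => hg q (List.mem_cons_of_mem _ hq)) c (pvRep p.1 p.2 cs) ?_]
    · simp [pvFold, List.foldl_cons]
    · intro q hq
      have hnc := pvNoCreate p.1 p.2 ht hu q.1
        (pvGoodB_elim (hg q (List.mem_cons_of_mem _ hq))).2.2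
        (c :: cs) (h q (List.mem_cons_of_mem _ hq))
      rwa [pvRep_cons_neg p.2 hp] at hnc

-- "s has a visible mismatch with t at every start position": t cannot match inside s ++ x
def pvMism (s t : List Char) : Bool :=
  (List.range s.length).all fun j =>
    (List.range t.length).any fun i => decide (j + i < s.length) && (s[j+i]? != t[i]?)

theorem pvNotPrefix_of_mism {s t : List Char} (x : List Char) (hs : s ≠ [])
    (h : pvMism s t = true) : t.isPrefixOf (s ++ x) = false := by
  by_contra hc
  have hpre : t <+: s ++ x := List.isPrefixOf_iff_prefix.mp (by simpa using hc)
  obtain ⟨r, hr⟩ := hpre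
  simp only [pvMism, List.all_eq_true, List.any_eq_true, List.mem_range, Bool.and_eq_true,
    decide_eq_true_eq, bne_iff_ne, ne_eq] at h
  obtain ⟨i, hi, hlt, hne⟩ := h 0 (List.length_pos_iff.mpr hs)
  simp only [Nat.zero_add] at hlt hne
  apply hne
  have h1 : (s ++ x)[i]? = s[i]? := List.getElem?_append_left hlt
  have h2 : (s ++ x)[i]? = t[i]? := by
    rw [← hr]; exact List.getElem?_append_left hi
  rw [← h1, h2]

theorem pvMism_tail {c : Char} {s t : List Char} (h : pvMism (c :: s) t = true) :
    pvMism s t = true := by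
  simp only [pvMism, List.all_eq_true, List.any_eq_true, List.mem_range, Bool.and_eq_true,
    decide_eq_true_eq, bne_iff_ne, ne_eq, List.length_cons] at h ⊢
  intro j hj
  obtain ⟨i, hi, hlt, hne⟩ := h (j + 1) (by omega)
  refine ⟨i, hi, by omega, ?_⟩
  have : (c :: s)[j + 1 + i]? = s[j + i]? := by
    rw [show j + 1 + i = (j + i) + 1 by omega]
    simp
  rwa [this] at hne

-- push a fully-mismatching block s through every pass
theorem pvFoldAppend (TL : List (List Char × List Char))
    (hg : ∀ p ∈ TL, pvGoodB p = true) :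
    ∀ (s : List Char), (∀ p ∈ TL, pvMism s p.1 = true) → ∀ (x : List Char),
      pvFold TL (s ++ x) = s ++ pvFold TL x := by
  intro s
  induction s with
  | nil => intro _ x; simp
  | cons c s' ih =>
    intro hs x
    have h1 : pvFold TL (c :: (s' ++ x)) = c :: pvFold TL (s' ++ x) :=
      pvFoldCons TL hg c (s' ++ x)
        (fun p hp => pvNotPrefix_of_mism x (by simp) (hs p hp))
    simpa [h1] using congrArg (c :: ·) (ih (fun p hp => pvMism_tail (hs p hp)) x)

-- concrete interference facts about the table
theorem pvTok_mism : ∀ p ∈ pvTableB, ∀ q ∈ pvTableB, p.1 ≠ q.1 → pvMism p.1 q.1 = true := by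
  decide

theorem pvRep_mism : ∀ p ∈ pvTableB, ∀ q ∈ pvTableB, pvMism p.2 q.1 = true := by
  decide

-- A's fold, moved to char lists
theorem pvAfold : ∀ (SL : List (String × String)) (s : String),
    (∀ p ∈ SL, p.1.toList ≠ []) →
    (SL.foldl (fun p sr => PySem.Str.replace p sr.1 sr.2) s).toList
      = pvFold (SL.map fun sr => (sr.1.toList, sr.2.toList)) s.toList := by
  intro SL
  induction SL with
  | nil => intro s _; rfl
  | cons a SL' ih =>
    intro s h
    simp only [List.foldl_cons, List.map_cons]
    rw [ih (PySem.Str.replace s a.1 a.2) (fun p hp => h p (List.mem_cons_of_mem _ hp))]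
    have : (PySem.Str.replace s a.1 a.2).toList = pvRep a.1.toList a.2.toList s.toList := by
      rw [PySem.Str.toList_replace]
      exact pvReplace_eq s.toList a.2.toList (h a List.mem_cons_self)
    rw [this]
    rfl

-- MAIN: the 14 sequential passes equal the single scan
theorem pvMain : ∀ (l : List Char), pvFold pvTableB l = pvScanB l := by
  suffices H : ∀ (n : Nat) (l : List Char), l.length ≤ n → pvFold pvTableB l = pvScanB l by
    intro l; exact H l.length l le_rfl
  intro n
  induction n with
  | zero =>
    intro l hl
    have hnil : l = [] := List.eq_nil_of_length_eq_zero (Nat.le_zero.mp hl)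
    subst hnil
    rw [pvFold_nil, pvScanB_nil]
  | succ n ih =>
    intro l hl
    cases hft : pvFirstTok l with
    | none =>
      have hall : ∀ p ∈ pvTableB, p.1.isPrefixOf l = false := by
        have h := List.find?_eq_none.mp hft
        intro p hp
        have := h p hp
        simp only [Bool.not_eq_true] at this
        exact this
      match l with
      | [] => rw [pvFold_nil, pvScanB_nil]
      | c :: cs =>
        rw [pvFoldCons pvTableB pvTable_good c cs hall]
        rw [ih cs (by simp only [List.length_cons] at hl; omega)]
        rw [pvScanB_cons_none hft]
    | some p =>
      obtain ⟨hpred, T1, T2, hT, hprev⟩ := List.find?_eq_some_iff_append.mp hft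
      have hpre : p.1 <+: l := List.isPrefixOf_iff_prefix.mp hpred
      obtain ⟨rest, rfl⟩ := hpre
      have hmem : p ∈ pvTableB := List.mem_of_find?_eq_some hft
      have hgp := pvTable_good p hmem
      have ht1 : p.1 ≠ [] := (pvGoodB_elim hgp).1
      have hlen1 : 0 < p.1.length := List.length_pos_iff.mpr ht1
      have hgT1 : ∀ q ∈ T1, pvGoodB q = true := fun q hq =>
        pvTable_good q (by rw [hT]; exact List.mem_append_left _ hq)
      have hgT2 : ∀ q ∈ T2, pvGoodB q = true := fun q hq =>
        pvTable_good q (by rw [hT]; exact List.mem_append_right _ (List.mem_cons_of_mem _ hq))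
      have hsplit : ∀ (z : List Char),
          pvFold pvTableB z = pvFold T2 (pvRep p.1 p.2 (pvFold T1 z)) := by
        intro z
        rw [hT]
        simp [pvFold, List.foldl_append, List.foldl_cons]
      rw [hsplit]
      have hmT1 : ∀ q ∈ T1, pvMism p.1 q.1 = true := by
        intro q hq
        have hqT : q ∈ pvTableB := by rw [hT]; exact List.mem_append_left _ hq
        have hne : p.1 ≠ q.1 := by
          intro he
          have hfail := hprev q hq
          simp only [Bool.not_eq_eq_eq_not, Bool.not_true] at hfail
          rw [← he] at hfail
          have : p.1.isPrefixOf (p.1 ++ rest) = true :=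
            List.isPrefixOf_iff_prefix.mpr (List.prefix_append _ _)
          rw [this] at hfail; cases hfail
        exact pvTok_mism p hmem q hqT hne
      rw [pvFoldAppend T1 hgT1 p.1 hmT1 rest]
      rw [pvRep_append ht1]
      rw [pvFoldAppend T2 hgT2 p.2 (fun q hq => pvRep_mism p hmem q
        (by rw [hT]; exact List.mem_append_right _ (List.mem_cons_of_mem _ hq))) _]
      rw [← hsplit rest]
      rw [ih rest (by simp only [List.length_append] at hl; omega)]
      rw [pvScanB_some hft, List.drop_left]

-- ===== VERDICT (by name: the statement is the Claim_ definition above) =====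
theorem convert_yang_regex_py_spec : Claim_equal_convert_yang_regex_py := by
  intro pattern _
  unfold Spec_convert_yang_regex_py convert_yang_regex_py convert_yang_regex_py_alt
  rw [← String.toList_inj]
  rw [pvAfold pvTransMapA pattern (by decide)]
  rw [show (pvTransMapA.map fun sr => (sr.1.toList, sr.2.toList)) = pvTableB from by decide]
  rw [pvMain pattern.toList]
  rw [String.toList_ofList]
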